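-- pv_equiv track=rewrite | github.com/whyNLP/Conic10K | data.py | set_expr
-- ===== SOURCE A (Python) =====
-- def set_expr(example):
--     # rearrange declarations to the front
--     sentences = example['fact_expressions'].split(';')
--     sentences = sorted([s for s in sentences if ':' in s]) + \
--         sorted([s for s in sentences if ':' not in s])
--     exprs = ';'.join(sentences)
--     example['expr'] = exprs + ';' + \
--         ';'.join(
--             list(map(lambda x: x + " = ?", example['query_expressions'].split(';'))))
--
--     return example
-- ===== SOURCE B (Python) =====
-- def set_expr(example):
--     # single-pass insertion sort: place each sentence directly at its final position
--     # (colon-containing sentences rank before colon-free ones, lexicographic within)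
--     ordered = []
--     for s in example['fact_expressions'].split(';'):
--         key = (':' not in s, s)
--         j = 0
--         while j < len(ordered) and not ((':' not in ordered[j], ordered[j]) > key):
--             j += 1
--         ordered.insert(j, s)
--     example['expr'] = ';'.join(ordered) + ';' + \
--         ';'.join(q + " = ?" for q in example['query_expressions'].split(';'))
--     return example
-- ===== Notes on version B (the rewrite author's own statement) =====
-- stated objective: alternative
-- what changed: Replaces A's two filtered comprehensions plus two separate library sorts (concatenated) by a single-pass insertion sort: each sentence is placed directly at its final position under the compound order (colon-containing first, lexicographic within), with no filtering and no call to sorted().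
import Mathlib
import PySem

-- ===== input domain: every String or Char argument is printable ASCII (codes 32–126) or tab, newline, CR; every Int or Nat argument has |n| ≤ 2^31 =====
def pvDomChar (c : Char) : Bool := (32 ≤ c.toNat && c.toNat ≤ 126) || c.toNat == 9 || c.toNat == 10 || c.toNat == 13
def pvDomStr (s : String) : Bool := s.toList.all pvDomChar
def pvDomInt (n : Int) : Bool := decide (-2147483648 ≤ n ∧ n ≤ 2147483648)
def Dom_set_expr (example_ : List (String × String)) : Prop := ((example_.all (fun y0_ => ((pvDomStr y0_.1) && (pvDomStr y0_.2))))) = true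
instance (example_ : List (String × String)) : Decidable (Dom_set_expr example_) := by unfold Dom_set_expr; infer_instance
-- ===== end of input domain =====

-- B replaces A's two filtered comprehensions + two library sorts by a SINGLE PASS that
-- insertion-sorts each sentence directly into its final position under the compound order
-- (colon-free sentences last, lexicographic within each group): a different algorithm.
-- Both A and B mutate the input dict (setting key 'expr') and return it; the ports model the
-- dict as an association list (first-match lookup, overwrite-in-place-else-append assignment).

-- s.split(';'): PySem.Str.split? is none only for an empty separator, so with the literal ";" the
-- .getD [] is never taken and this is exactly Python's split
def pvSplit (s : String) : List String := (PySem.Str.split? s ";").getD []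

-- shared dict helpers (both Pythons perform the identical dict lookup/assignment)
def pvLookup? (d : List (String × String)) (k : String) : Option String :=
  match d with
  | [] => none
  | (k', v) :: t => if k' = k then some v else pvLookup? t k

def pvSetKey (d : List (String × String)) (k v : String) : List (String × String) :=
  match d with
  | [] => [(k, v)]
  | (k', v') :: t => if k' = k then (k, v) :: t else (k', v') :: pvSetKey t k v

-- Python's tuple comparison ((!p a), a) < ((!p b), b) used by B's insertion test
-- (Bool order: false < true)
def pvB2 (p : α → Bool) [LT α] [DecidableLT α] (a b : α) : Bool :=
  decide ((!p a) < (!p b)) || !decide ((!p b) < (!p a)) && decide (a < b)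

-- ===== PORT A =====
def set_expr (example_ : List (String × String)) : List (String × String) :=
  match pvLookup? example_ "fact_expressions", pvLookup? example_ "query_expressions" with
  | some fact, some query =>
    let sentences := pvSplit fact
    let sentences :=
      PySem.List.sorted (sentences.filter (fun s => PySem.Str.isIn ":" s)) (fun s => s) false ++
      PySem.List.sorted (sentences.filter (fun s => !PySem.Str.isIn ":" s)) (fun s => s) false
    let exprs := PySem.Str.join ";" sentences
    pvSetKey example_ "expr"
      (exprs ++ ";" ++ PySem.Str.join ";" ((pvSplit query).map (fun x => x ++ " = ?")))
  | _, _ => []  -- KeyError in Python: excluded by Pre_set_expr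

-- ===== PORT B =====
-- B's inner while-loop + list.insert places s before the first element whose compound key is
-- strictly greater: exactly PySem.List.insertBy with the tuple comparison pvB2.
def set_expr_alt (example_ : List (String × String)) : List (String × String) :=
  match pvLookup? example_ "fact_expressions" with
  | none => []  -- KeyError in Python: excluded by Pre_set_expr
  | some fact =>
    match pvLookup? example_ "query_expressions" with
    | none => []  -- KeyError in Python: excluded by Pre_set_expr
    | some query =>
      let ordered := (pvSplit fact).foldl
        (fun acc s => PySem.List.insertBy (pvB2 (fun t => PySem.Str.isIn ":" t)) s acc) []
      pvSetKey example_ "expr"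
        (PySem.Str.join ";" ordered ++ ";" ++
          PySem.Str.join ";" ((pvSplit query).map (fun q => q ++ " = ?")))

-- ===== PRECONDITION & SPEC =====
-- Pre_ excludes only the inputs where Python A raises KeyError: a missing
-- 'fact_expressions' or 'query_expressions' key.
def Pre_set_expr (example_ : List (String × String)) : Prop :=
  "fact_expressions" ∈ example_.map Prod.fst ∧ "query_expressions" ∈ example_.map Prod.fst
instance (example_ : List (String × String)) : Decidable (Pre_set_expr example_) := by
  unfold Pre_set_expr; infer_instance

def pvWitness_set_expr : (List (String × String)) :=
  [("fact_expressions", "x: A;a = 1"), ("query_expressions", "a")]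

def Spec_set_expr (example_ : List (String × String)) (out : List (String × String)) : Prop := out = set_expr_alt example_
instance (example_ : List (String × String)) (out : List (String × String)) : Decidable (Spec_set_expr example_ out) := by unfold Spec_set_expr; infer_instance

-- ===== CLAIM (what is proved, stated in full; the proofs are below) =====
def Claim_equal_set_expr : Prop := ∀ (example_ : List (String × String)), Dom_set_expr example_ → Pre_set_expr example_ → Spec_set_expr example_ (set_expr example_)

-- ===== LEMMAS AND PROOFS =====

theorem insertBy_sep [LinearOrder α] (p : α → Bool) (x : α) (A B : List α)
    (hA : ∀ a ∈ A, p a = true) (hB : ∀ b ∈ B, p b = false) :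
    PySem.List.insertBy (pvB2 p) x (A ++ B) =
      if p x then PySem.List.insertBy (fun a b => decide (a < b)) x A ++ B
      else A ++ PySem.List.insertBy (fun a b => decide (a < b)) x B := by
  by_cases hx : p x = true
  · simp only [hx, if_pos]
    induction A with
    | nil =>
      cases B with
      | nil => simp [PySem.List.insertBy]
      | cons b B' =>
        have hb := hB b (by simp)
        simp [PySem.List.insertBy, pvB2, hx, hb]
    | cons a A' ih =>
      have ha := hA a (by simp)
      have h2 : pvB2 p x a = decide (x < a) := by simp [pvB2, hx, ha]
      by_cases hlt : x < a
      · simp [PySem.List.insertBy, h2, hlt]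
      · simp only [List.cons_append, PySem.List.insertBy, h2]
        simp only [decide_eq_true_eq]
        rw [if_neg hlt, if_neg hlt]
        simp [ih (fun a ha' => hA a (by simp [ha']))]
  · have hx' : p x = false := by simpa using hx
    simp only [hx', if_neg, Bool.false_eq_true, not_false_iff]
    induction A with
    | nil =>
      simp only [List.nil_append]
      induction B with
      | nil => simp [PySem.List.insertBy]
      | cons b B' ihB =>
        have hb := hB b (by simp)
        have h2 : pvB2 p x b = decide (x < b) := by simp [pvB2, hx', hb]
        by_cases hlt : x < b
        · simp [PySem.List.insertBy, h2, hlt]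
        · simp only [PySem.List.insertBy, h2, decide_eq_true_eq]
          rw [if_neg hlt, if_neg hlt]
          simp [ihB (fun b hb' => hB b (by simp [hb']))]
    | cons a A' ih =>
      have ha := hA a (by simp)
      have h2 : pvB2 p x a = false := by simp [pvB2, hx', ha]
      simp only [List.cons_append, PySem.List.insertBy, h2]
      simp [ih (fun a ha' => hA a (by simp [ha']))]

theorem foldl_sep [LinearOrder α] (p : α → Bool) (xs A B : List α)
    (hA : ∀ a ∈ A, p a = true) (hB : ∀ b ∈ B, p b = false) :
    xs.foldl (fun acc x => PySem.List.insertBy (pvB2 p) x acc) (A ++ B) =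
      (xs.filter p).foldl (fun acc x => PySem.List.insertBy (fun a b => decide (a < b)) x acc) A ++
      (xs.filter (fun x => !p x)).foldl (fun acc x => PySem.List.insertBy (fun a b => decide (a < b)) x acc) B := by
  induction xs generalizing A B with
  | nil => simp
  | cons x xs ih =>
    simp only [List.foldl_cons, List.filter_cons]
    rw [insertBy_sep p x A B hA hB]
    by_cases hx : p x = true
    · simp only [hx, if_pos, List.foldl_cons]
      refine ih _ _ (fun a ha => ?_) hB
      rw [PySem.List.mem_insertBy] at ha
      rcases ha with h | h
      · exact h ▸ hx
      · exact hA a h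
    · have hx' : p x = false := by simpa using hx
      simp only [hx', Bool.false_eq_true, if_neg, not_false_iff, Bool.not_false, if_pos, List.foldl_cons]
      refine ih _ _ hA (fun b hb => ?_)
      rw [PySem.List.mem_insertBy] at hb
      rcases hb with h | h
      · exact h ▸ hx'
      · exact hB b h

theorem foldl_insert_split (p : String → Bool) (xs : List String) :
    xs.foldl (fun acc s => PySem.List.insertBy (pvB2 p) s acc) [] =
      PySem.List.sorted (xs.filter p) (fun s => s) false ++
      PySem.List.sorted (xs.filter (fun s => !p s)) (fun s => s) false := by
  rw [PySem.List.sorted_eq_foldl_insertBy, PySem.List.sorted_eq_foldl_insertBy]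
  exact foldl_sep p xs [] [] (by simp) (by simp)

-- ===== VERDICT (by name: the statement is the Claim_ definition above) =====
theorem set_expr_spec : Claim_equal_set_expr := by
  intro example_ _ _
  unfold Spec_set_expr set_expr set_expr_alt
  cases pvLookup? example_ "fact_expressions" with
  | none => rfl
  | some fact =>
    cases pvLookup? example_ "query_expressions" with
    | none => rfl
    | some query =>
      simp only []
      rw [foldl_insert_split (fun s => PySem.Str.isIn ":" s)]
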